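-- pv_equiv track=rewrite | github.com/99004302-nikhilhr/Python-Miniproject-258088 | tetris.py | c_g
-- ===== SOURCE A (Python) =====
-- def c_g(l_p={}):
--     gd = [[(0,0,0) for m in range(10)] for m in range(20)]
--
--     for m in range(len(gd)):
--         for n in range(len(gd[m])):
--             if (n,m) in l_p:
--                 c = l_p[(n,m)]
--                 gd[m][n] = c
--     return gd
-- ===== SOURCE B (Python) =====
-- def c_g(l_p={}):
--     gd = [[(0, 0, 0)] * 10 for _ in range(20)]
--     for (n, m), c in l_p.items():
--         if 0 <= n < 10 and 0 <= m < 20: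
--             gd[m][n] = c
--     return gd
-- ===== Notes on version B (the rewrite author's own statement) =====
-- stated objective: simpler
-- what changed: Instead of scanning all 200 grid cells and testing each coordinate for dict membership, B iterates once over the dict's items and writes each in-bounds entry directly into the grid.
import Mathlib
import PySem

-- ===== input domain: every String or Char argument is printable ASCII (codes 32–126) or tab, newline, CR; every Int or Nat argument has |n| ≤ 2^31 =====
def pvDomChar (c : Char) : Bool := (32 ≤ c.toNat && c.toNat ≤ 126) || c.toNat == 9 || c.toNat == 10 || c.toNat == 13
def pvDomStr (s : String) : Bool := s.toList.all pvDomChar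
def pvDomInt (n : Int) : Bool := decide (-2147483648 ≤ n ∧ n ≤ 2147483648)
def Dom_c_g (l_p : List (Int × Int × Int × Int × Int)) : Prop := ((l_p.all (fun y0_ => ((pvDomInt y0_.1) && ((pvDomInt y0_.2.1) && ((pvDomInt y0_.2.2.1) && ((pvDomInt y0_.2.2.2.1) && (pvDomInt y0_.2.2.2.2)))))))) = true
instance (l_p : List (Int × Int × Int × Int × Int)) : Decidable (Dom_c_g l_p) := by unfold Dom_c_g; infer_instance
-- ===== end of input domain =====

-- B builds the same 20×10 zero grid but fills it by one pass over the dict's items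
-- (with a bounds check) instead of testing all 200 cells for dict membership.

-- ===== PORT A =====
-- dict lookup '(n, m) in l_p' / 'l_p[(n, m)]': first entry of the association list
-- whose key components are (n, m); its value is the colour triple.
def pvLookup (l_p : List (Int × Int × Int × Int × Int)) (n m : Int) :
    Option (Int × Int × Int) :=
  match l_p with
  | [] => none
  | t :: rest =>
    if t.1 = n ∧ t.2.1 = m then some (t.2.2.1, t.2.2.2) else pvLookup rest n m

def c_g (l_p : List (Int × Int × Int × Int × Int)) : List (List (Int × Int × Int)) :=
  let gd := (List.range 20).map (fun _ => (List.range 10).map (fun _ => ((0 : Int), (0 : Int), (0 : Int))))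
  (List.range 20).foldl (fun gd (m : Nat) =>
    (List.range 10).foldl (fun gd (n : Nat) =>
      match pvLookup l_p (n : Int) (m : Int) with
      | some c => gd.set m ((gd.getD m []).set n c)
      | none => gd) gd) gd

-- ===== PORT B =====
def c_g_alt (l_p : List (Int × Int × Int × Int × Int)) : List (List (Int × Int × Int)) :=
  let gd := (List.range 20).map (fun _ => List.replicate 10 ((0 : Int), (0 : Int), (0 : Int)))
  l_p.foldl (fun gd t =>
    if 0 ≤ t.1 ∧ t.1 < 10 ∧ 0 ≤ t.2.1 ∧ t.2.1 < 20 then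
      gd.set t.2.1.toNat ((gd.getD t.2.1.toNat []).set t.1.toNat (t.2.2.1, t.2.2.2))
    else gd) gd

-- ===== PRECONDITION & SPEC =====
-- Pre_ excludes association lists with a duplicate (n, m) key: no Python dict argument
-- produces one (a dict literal already collapses duplicate keys, so A and B see the same
-- dict and agree), and on such raw lists the two ports' duplicate resolution
-- (A: first match, B: last write) is accidental.
def Pre_c_g (l_p : List (Int × Int × Int × Int × Int)) : Prop :=
  (l_p.map (fun t => (t.1, t.2.1))).Nodup
instance (l_p : List (Int × Int × Int × Int × Int)) : Decidable (Pre_c_g l_p) := by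
  unfold Pre_c_g; infer_instance

def pvWitness_c_g : (List (Int × Int × Int × Int × Int)) := [(1, 2, 9, 9, 9), (100, 0, 1, 1, 1)]

def Spec_c_g (l_p : List (Int × Int × Int × Int × Int)) (out : List (List (Int × Int × Int))) : Prop := out = c_g_alt l_p
instance (l_p : List (Int × Int × Int × Int × Int)) (out : List (List (Int × Int × Int))) : Decidable (Spec_c_g l_p out) := by unfold Spec_c_g; infer_instance

-- ===== CLAIM (what is proved, stated in full; the proofs are below) =====
def Claim_equal_c_g : Prop := ∀ (l_p : List (Int × Int × Int × Int × Int)), Dom_c_g l_p → Pre_c_g l_p → Spec_c_g l_p (c_g l_p)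

-- ===== LEMMAS AND PROOFS =====

-- The common value both ports compute: cell (m, n) holds the (unique, under Pre_)
-- entry keyed (n, m), else black.
def pvFill (l_p : List (Int × Int × Int × Int × Int)) (m n : Nat) : Int × Int × Int :=
  (pvLookup l_p (n : Int) (m : Int)).getD (0, 0, 0)

def pvGrid (l_p : List (Int × Int × Int × Int × Int)) : List (List (Int × Int × Int)) :=
  (List.range 20).map (fun m => (List.range 10).map (pvFill l_p m))

-- general getD-of-set facts (searched for; not found under these statements in Mathlib)
theorem pv_getD_set_self {a : Type} (l : List a) (n : Nat) (x d : a) (h : n < l.length) :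
    (l.set n x).getD n d = x := by
  simp [List.getD_eq_getElem?_getD, h]

theorem pv_getD_set_ne {a : Type} (l : List a) (n m : Nat) (x d : a) (h : n ≠ m) :
    (l.set n x).getD m d = l.getD m d := by
  simp [List.getD_eq_getElem?_getD, List.getElem?_set_ne h]

theorem pvLookup_cons (t : Int × Int × Int × Int × Int)
    (rest : List (Int × Int × Int × Int × Int)) (a b : Int) :
    pvLookup (t :: rest) a b
    = if t.1 = a ∧ t.2.1 = b then some (t.2.2.1, t.2.2.2) else pvLookup rest a b := rfl

-- ---- A side: the row-by-row fill computes pvGrid ----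
def pvRowBody (l_p : List (Int × Int × Int × Int × Int)) (m : Nat)
    (r : List (Int × Int × Int)) (n : Nat) : List (Int × Int × Int) :=
  match pvLookup l_p (n : Int) (m : Int) with
  | some c => r.set n c
  | none => r

def pvRowFold (l_p : List (Int × Int × Int × Int × Int)) (m j : Nat)
    (r : List (Int × Int × Int)) : List (Int × Int × Int) :=
  (List.range j).foldl (pvRowBody l_p m) r

theorem pvRowFold_succ (l_p : List (Int × Int × Int × Int × Int)) (m j : Nat)
    (r : List (Int × Int × Int)) :
    pvRowFold l_p m (j + 1) r = pvRowBody l_p m (pvRowFold l_p m j r) j := by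
  unfold pvRowFold
  rw [List.range_succ, List.foldl_append, List.foldl_cons, List.foldl_nil]

theorem pv_inner_eq (l_p : List (Int × Int × Int × Int × Int)) (m : Nat) (j : Nat)
    (gd : List (List (Int × Int × Int))) (hm : m < gd.length) :
    (List.range j).foldl (fun gd (n : Nat) =>
        match pvLookup l_p (n : Int) (m : Int) with
        | some c => gd.set m ((gd.getD m []).set n c)
        | none => gd) gd
    = gd.set m (pvRowFold l_p m j (gd.getD m [])) := by
  induction j with
  | zero =>
    simp only [List.range_zero, List.foldl_nil, pvRowFold]
    rw [List.getD_eq_getElem gd [] hm]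
    exact (List.set_getElem_self hm).symm
  | succ j ih =>
    rw [show List.range (j + 1) = List.range j ++ [j] from List.range_succ,
      List.foldl_append, List.foldl_cons, List.foldl_nil, ih, pvRowFold_succ]
    cases hc : pvLookup l_p (j : Int) (m : Int) with
    | none => simp only [pvRowBody, hc]
    | some c =>
      simp only [pvRowBody, hc]
      rw [pv_getD_set_self gd m _ [] hm, List.set_set]

def pvZeroRow : List (Int × Int × Int) :=
  (List.range 10).map (fun _ => ((0 : Int), (0 : Int), (0 : Int)))

theorem pvRowFold_zero_row (l_p : List (Int × Int × Int × Int × Int)) (m j : Nat)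
    (hj : j ≤ 10) :
    pvRowFold l_p m j pvZeroRow
    = (List.range 10).map (fun n => if n < j then pvFill l_p m n else (0, 0, 0)) := by
  induction j with
  | zero => simp [pvRowFold, pvZeroRow]
  | succ j ih =>
    rw [pvRowFold_succ, ih (by omega)]
    unfold pvRowBody
    cases hc : pvLookup l_p (j : Int) (m : Int) with
    | none =>
      apply List.map_congr_left
      intro n hn
      by_cases h : n = j
      · subst h
        rw [if_neg (by omega), if_pos (by omega)]
        simp [pvFill, hc]
      · by_cases hlt : n < j
        · rw [if_pos hlt, if_pos (by omega)]
        · rw [if_neg hlt, if_neg (by omega)]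
    | some c =>
      apply List.ext_getElem
      · simp
      · intro i h1 h2
        simp only [List.length_set, List.length_map, List.length_range] at h1 h2
        rw [List.getElem_set]
        by_cases h : j = i
        · subst h
          rw [if_pos rfl]
          simp only [List.getElem_map, List.getElem_range]
          rw [if_pos (by omega)]
          simp [pvFill, hc]
        · simp only [if_neg h, List.getElem_map, List.getElem_range]
          by_cases hlt : i < j
          · rw [if_pos hlt, if_pos (by omega)]
          · rw [if_neg hlt, if_neg (by omega)]

def pvGridK (l_p : List (Int × Int × Int × Int × Int)) (k : Nat) :
    List (List (Int × Int × Int)) :=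
  (List.range 20).map (fun m =>
    (List.range 10).map (fun n => if m < k then pvFill l_p m n else (0, 0, 0)))

theorem pv_outer_eq (l_p : List (Int × Int × Int × Int × Int)) (k : Nat) (hk : k ≤ 20) :
    (List.range k).foldl (fun gd (m : Nat) =>
      (List.range 10).foldl (fun gd (n : Nat) =>
        match pvLookup l_p (n : Int) (m : Int) with
        | some c => gd.set m ((gd.getD m []).set n c)
        | none => gd) gd)
      ((List.range 20).map (fun _ =>
        (List.range 10).map (fun _ => ((0 : Int), (0 : Int), (0 : Int)))))
    = pvGridK l_p k := by
  induction k with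
  | zero =>
    simp only [List.range_zero, List.foldl_nil, pvGridK]
    apply List.map_congr_left
    intro m _
    simp
  | succ k ih =>
    rw [show List.range (k + 1) = List.range k ++ [k] from List.range_succ,
      List.foldl_append, List.foldl_cons, List.foldl_nil, ih (by omega)]
    have hlen : k < (pvGridK l_p k).length := by
      simp only [pvGridK, List.length_map, List.length_range]; omega
    rw [pv_inner_eq l_p k 10 _ hlen]
    have hrow : (pvGridK l_p k).getD k [] = pvZeroRow := by
      rw [List.getD_eq_getElem _ [] hlen]
      simp only [pvGridK, List.getElem_map, List.getElem_range, pvZeroRow]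
      apply List.map_congr_left
      intro n _
      rw [if_neg (by omega)]
    rw [hrow, pvRowFold_zero_row l_p k 10 (by omega)]
    apply List.ext_getElem
    · simp [pvGridK]
    · intro i h1 h2
      simp only [pvGridK, List.length_set, List.length_map, List.length_range] at h1 h2
      rw [List.getElem_set]
      by_cases h : k = i
      · subst h
        rw [if_pos rfl]
        simp only [pvGridK, List.getElem_map, List.getElem_range]
        apply List.map_congr_left
        intro n hn
        simp only [List.mem_range] at hn
        rw [if_pos hn, if_pos (by omega)]
      · simp only [if_neg h, pvGridK, List.getElem_map, List.getElem_range]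
        apply List.map_congr_left
        intro n _
        by_cases hlt : i < k
        · rw [if_pos hlt, if_pos (by omega)]
        · rw [if_neg hlt, if_neg (by omega)]

theorem c_g_eq_grid (l_p : List (Int × Int × Int × Int × Int)) :
    c_g l_p = pvGrid l_p := by
  have h := pv_outer_eq l_p 20 (by omega)
  have hfin : pvGridK l_p 20 = pvGrid l_p := by
    unfold pvGridK pvGrid
    apply List.map_congr_left
    intro m hm
    simp only [List.mem_range] at hm
    apply List.map_congr_left
    intro n _
    rw [if_pos hm]
  exact h.trans hfin

-- ---- B side: the single pass over the items computes pvGrid under Pre_ ----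
def pvStepB (gd : List (List (Int × Int × Int))) (t : Int × Int × Int × Int × Int) :
    List (List (Int × Int × Int)) :=
  if 0 ≤ t.1 ∧ t.1 < 10 ∧ 0 ≤ t.2.1 ∧ t.2.1 < 20 then
    gd.set t.2.1.toNat ((gd.getD t.2.1.toNat []).set t.1.toNat (t.2.2.1, t.2.2.2))
  else gd

def pvShape (gd : List (List (Int × Int × Int))) : Prop :=
  gd.length = 20 ∧ ∀ row ∈ gd, row.length = 10

theorem pvShape_step (gd : List (List (Int × Int × Int)))
    (t : Int × Int × Int × Int × Int) (h : pvShape gd) : pvShape (pvStepB gd t) := by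
  unfold pvStepB
  split
  · next hc =>
    constructor
    · simp [h.1]
    · intro row hrow
      rcases List.mem_or_eq_of_mem_set hrow with hmem | heq
      · exact h.2 row hmem
      · subst heq
        rw [List.length_set]
        have hlt : t.2.1.toNat < gd.length := by rw [h.1]; omega
        rw [List.getD_eq_getElem gd [] hlt]
        exact h.2 _ (List.getElem_mem hlt)
  · exact h

theorem pvShape_fold (l_p : List (Int × Int × Int × Int × Int))
    (gd : List (List (Int × Int × Int))) (h : pvShape gd) :
    pvShape (l_p.foldl pvStepB gd) := by
  induction l_p generalizing gd with
  | nil => exact h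
  | cons t rest ih => exact ih _ (pvShape_step gd t h)

theorem pvLookup_none_of_not_mem (l_p : List (Int × Int × Int × Int × Int)) (a b : Int)
    (h : (a, b) ∉ l_p.map (fun t => (t.1, t.2.1))) : pvLookup l_p a b = none := by
  induction l_p with
  | nil => rfl
  | cons t rest ih =>
    simp only [List.map_cons, List.mem_cons, not_or] at h
    rw [pvLookup_cons, if_neg, ih h.2]
    intro hc
    exact h.1 (by rw [hc.1, hc.2])

theorem pv_cellB (l_p : List (Int × Int × Int × Int × Int))
    (gd : List (List (Int × Int × Int)))
    (hnd : (l_p.map (fun t => (t.1, t.2.1))).Nodup) (hs : pvShape gd)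
    (m n : Nat) (hm : m < 20) (hn : n < 10) :
    ((l_p.foldl pvStepB gd).getD m []).getD n (0, 0, 0)
    = (pvLookup l_p (n : Int) (m : Int)).getD ((gd.getD m []).getD n (0, 0, 0)) := by
  induction l_p generalizing gd with
  | nil => rfl
  | cons t rest ih =>
    simp only [List.map_cons, List.nodup_cons] at hnd
    rw [List.foldl_cons, ih (pvStepB gd t) hnd.2 (pvShape_step gd t hs)]
    by_cases hk : t.1 = (n : Int) ∧ t.2.1 = (m : Int)
    · have hnone : pvLookup rest (n : Int) (m : Int) = none := by
        apply pvLookup_none_of_not_mem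
        rw [← hk.1, ← hk.2]
        exact hnd.1
      rw [hnone, pvLookup_cons, if_pos hk, Option.getD_none, Option.getD_some]
      unfold pvStepB
      rw [if_pos (by refine ⟨by omega, ?_, by omega, ?_⟩ <;> omega)]
      have htm : t.2.1.toNat = m := by omega
      have htn : t.1.toNat = n := by omega
      rw [htm, htn, pv_getD_set_self gd m _ [] (by rw [hs.1]; omega),
        pv_getD_set_self _ n _ _ ?_]
      have hrow : (gd.getD m []).length = 10 := by
        rw [List.getD_eq_getElem gd [] (by rw [hs.1]; omega)]
        exact hs.2 _ (List.getElem_mem _)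
      omega
    · rw [pvLookup_cons, if_neg hk]
      congr 1
      unfold pvStepB
      split
      · next hc =>
        by_cases hr : t.2.1.toNat = m
        · rw [hr, pv_getD_set_self gd m _ [] (by rw [hs.1]; omega)]
          have hcn : t.1.toNat ≠ n := by
            intro he
            exact hk ⟨by omega, by omega⟩
          rw [pv_getD_set_ne _ _ _ _ _ hcn]
        · rw [pv_getD_set_ne _ _ _ _ _ hr]
      · rfl

theorem c_g_alt_foldB (l_p : List (Int × Int × Int × Int × Int))
    (h : Pre_c_g l_p) :
    l_p.foldl pvStepB ((List.range 20).map (fun _ =>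
      List.replicate 10 ((0 : Int), (0 : Int), (0 : Int)))) = pvGrid l_p := by
  have hs0 : pvShape ((List.range 20).map (fun _ =>
      List.replicate 10 ((0 : Int), (0 : Int), (0 : Int)))) := by
    refine ⟨by simp, ?_⟩
    intro row hrow
    simp only [List.mem_map] at hrow
    obtain ⟨_, _, hr⟩ := hrow
    rw [← hr]
    simp
  have hsf := pvShape_fold l_p _ hs0
  apply List.ext_getElem
  · rw [hsf.1]
    simp [pvGrid]
  · intro m h1 h2
    have hm : m < 20 := by rw [← hsf.1]; exact h1
    simp only [pvGrid, List.getElem_map, List.getElem_range] at h2 ⊢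
    apply List.ext_getElem
    · rw [hsf.2 _ (List.getElem_mem h1)]
      simp
    · intro n hn1 hn2
      have hn : n < 10 := by
        rw [hsf.2 _ (List.getElem_mem h1)] at hn1
        exact hn1
      have hzero : (((List.range 20).map (fun _ =>
          List.replicate 10 ((0 : Int), (0 : Int), (0 : Int)))).getD m []).getD n (0, 0, 0)
          = ((0 : Int), (0 : Int), (0 : Int)) := by
        rw [List.getD_eq_getElem _ [] (by simpa using hm)]
        simp only [List.getElem_map]
        rw [List.getD_eq_getElem _ _ (by simpa using hn)]
        simp only [List.getElem_replicate]
      have hcell := pv_cellB l_p _ h hs0 m n hm hn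
      rw [hzero, List.getD_eq_getElem _ [] h1, List.getD_eq_getElem _ (0, 0, 0) hn1]
        at hcell
      rw [hcell]
      simp only [List.getElem_map, List.getElem_range, pvFill]

theorem c_g_alt_eq_grid (l_p : List (Int × Int × Int × Int × Int))
    (h : Pre_c_g l_p) : c_g_alt l_p = pvGrid l_p := c_g_alt_foldB l_p h

-- ===== VERDICT (by name: the statement is the Claim_ definition above) =====
theorem c_g_spec : Claim_equal_c_g := by
  intro l_p _ hpre
  unfold Spec_c_g
  rw [c_g_eq_grid, c_g_alt_eq_grid l_p hpre]
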